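-- pv_equiv track=rewrite | github.com/YnezT0311/pros_2026_mem_follow | privacy_test/deletion/build_deletion_world.py | pick_user_turn
-- ===== SOURCE A (Python) =====
-- from typing import Dict, List, Optional, Tuple
--
-- def split_user_prefix(line: str) -> str:
--     if line.startswith("User:"):
--         return line[len("User:"):].strip()
--     return line.strip()
--
-- def pick_user_turn(lines: List[str], min_words: int = 10, avoid_idx: Optional[int] = None) -> Optional[int]:
--     cand = []
--     for i, line in enumerate(lines):
--         if avoid_idx is not None and i == avoid_idx:
--             continue
--         if not isinstance(line, str) or not line.startswith("User:"):
--             continue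
--         c = split_user_prefix(line)
--         cl = c.lower()
--         if any(k in cl for k in ["do not remember", "do not store", "forget", "delete", "do not retain"]):
--             continue
--         if "the detail is:" in cl or "earlier detail i told you" in cl or "previous detail from memory" in cl:
--             continue
--         if len(c.split()) < min_words:
--             continue
--         score = 0
--         if i > 0 and isinstance(lines[i - 1], str) and lines[i - 1].startswith("Side_Note"):
--             score += 2
--         if len(c.split()) >= 16:
--             score += 1
--         cand.append((score, i))
--     if not cand:
--         return None
--     cand.sort(key=lambda x: (-x[0], x[1]))
--     return cand[0][1]
-- ===== SOURCE B (Python) =====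
-- from typing import List, Optional
--
-- _BANNED = ("do not remember", "do not store", "forget", "delete", "do not retain",
--            "the detail is:", "earlier detail i told you", "previous detail from memory")
--
-- def _qual_word_count(line: str, min_words: int) -> Optional[int]:
--     """Word count of the content if this 'User:' line qualifies, else None."""
--     if not line.startswith("User:"):
--         return None
--     c = line[len("User:"):].strip()
--     cl = c.lower()
--     for k in _BANNED:
--         if k in cl:
--             return None
--     w = len(c.split())
--     return w if w >= min_words else None
--
-- def _score(lines: List[str], i: int, w: int) -> int:
--     return (2 if i > 0 and lines[i - 1].startswith("Side_Note") else 0) + (1 if w >= 16 else 0)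
--
-- def pick_user_turn(lines: List[str], min_words: int = 10, avoid_idx: Optional[int] = None) -> Optional[int]:
--     ok = []
--     for i, line in enumerate(lines):
--         if avoid_idx is not None and i == avoid_idx:
--             continue
--         w = _qual_word_count(line, min_words)
--         if w is not None:
--             ok.append((i, _score(lines, i, w)))
--     # scores are always in {0,1,2,3}; scan buckets from best to worst,
--     # indices are ascending so the first hit is the lowest index of the best score
--     for target in (3, 2, 1, 0):
--         for i, s in ok:
--             if s == target:
--                 return i
--     return None
-- ===== Notes on version B (the rewrite author's own statement) =====
-- stated objective: alternative
-- what changed: B factors the filter into an Option-returning qualifying-word-count helper and replaces A's collect-then-sort-by-(-score,index) with a sort-free bucket scan: it collects (index, score) pairs once and then, for each score target 3,2,1,0 in turn, returns the first index with that score (indices are ascending, so this reproduces A's tie-breaking).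
import Mathlib
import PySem

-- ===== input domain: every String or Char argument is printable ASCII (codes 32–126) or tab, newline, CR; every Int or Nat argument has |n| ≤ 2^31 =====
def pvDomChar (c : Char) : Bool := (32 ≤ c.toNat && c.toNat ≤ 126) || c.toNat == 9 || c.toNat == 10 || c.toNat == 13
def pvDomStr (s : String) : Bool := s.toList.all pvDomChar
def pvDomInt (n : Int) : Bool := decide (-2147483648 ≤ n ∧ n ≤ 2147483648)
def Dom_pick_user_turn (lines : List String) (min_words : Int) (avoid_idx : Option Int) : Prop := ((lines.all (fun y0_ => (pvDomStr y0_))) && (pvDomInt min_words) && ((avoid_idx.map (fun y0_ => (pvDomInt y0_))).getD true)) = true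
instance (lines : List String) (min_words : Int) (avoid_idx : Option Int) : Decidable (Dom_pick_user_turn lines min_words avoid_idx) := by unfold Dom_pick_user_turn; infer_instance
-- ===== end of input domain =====

-- B replaces A's collect-then-sort with a sort-free bucket scan over the four possible scores (alternative decomposition).

-- ===== PORT A =====
def splitUserPrefix (line : String) : String :=
  if PySem.Str.startswith line "User:" then
    PySem.Str.strip (PySem.Str.slice line (some (PySem.Str.len "User:" : Int)))
  else PySem.Str.strip line

def pick_user_turn (lines : List String) (min_words : Int) (avoid_idx : Option Int) : Option Int :=
  -- cand, built by the loop (inlined below), then sorted by (-score, index); its first index wins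
  match PySem.List.sorted2 ((PySem.List.enumerate lines).foldl (fun cand p =>
    if ((match avoid_idx with | some a => decide (p.1 = a) | none => false) : Bool) then cand
    else if !PySem.Str.startswith p.2 "User:" then cand
    else
      let c := splitUserPrefix p.2
      let cl := PySem.Str.lower c
      if ["do not remember", "do not store", "forget", "delete", "do not retain"].any
          (fun k => PySem.Str.isIn k cl) then cand
      else if PySem.Str.isIn "the detail is:" cl || PySem.Str.isIn "earlier detail i told you" cl ||
          PySem.Str.isIn "previous detail from memory" cl then cand
      else if ((PySem.Str.split₀ c).length : Int) < min_words then cand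
      else
        let score : Int := 0
        let score := if decide (0 < p.1) &&
            PySem.Str.startswith (PySem.List.pyGetD lines (p.1 - 1) "") "Side_Note" then score + 2 else score
        let score := if 16 ≤ (PySem.Str.split₀ c).length then score + 1 else score
        cand ++ [(score, p.1)]) []) (fun x => -x.1) (fun x => x.2) with
  | [] => none
  | q :: _ => some q.2

-- ===== PORT B =====
def bannedB : List String :=
  ["do not remember", "do not store", "forget", "delete", "do not retain",
   "the detail is:", "earlier detail i told you", "previous detail from memory"]

def qualWordCount (line : String) (min_words : Int) : Option Int :=
  if !PySem.Str.startswith line "User:" then none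
  else
    let c := PySem.Str.strip (PySem.Str.slice line (some (PySem.Str.len "User:" : Int)))
    let cl := PySem.Str.lower c
    if bannedB.any (fun k => PySem.Str.isIn k cl) then none
    else
      let w : Int := (PySem.Str.split₀ c).length
      if min_words ≤ w then some w else none

def scoreB (lines : List String) (i : Int) (w : Int) : Int :=
  (if decide (0 < i) && PySem.Str.startswith (PySem.List.pyGetD lines (i - 1) "") "Side_Note" then 2 else 0)
  + (if 16 ≤ w then 1 else 0)

def pick_user_turn_alt (lines : List String) (min_words : Int) (avoid_idx : Option Int) : Option Int :=
  -- ok = qualifying (index, score) pairs in index order; then scan score buckets best-first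
  ([3, 2, 1, 0] : List Int).findSome? (fun t =>
    (((PySem.List.enumerate lines).foldl (fun acc p =>
        if avoid_idx == some p.1 then acc
        else match qualWordCount p.2 min_words with
          | none => acc
          | some w => acc ++ [(p.1, scoreB lines p.1 w)]) []).find? (fun q => q.2 == t)).map (fun q => q.1))

-- ===== PRECONDITION & SPEC =====
def Spec_pick_user_turn (lines : List String) (min_words : Int) (avoid_idx : Option Int) (out : Option Int) : Prop := out = pick_user_turn_alt lines min_words avoid_idx
instance (lines : List String) (min_words : Int) (avoid_idx : Option Int) (out : Option Int) : Decidable (Spec_pick_user_turn lines min_words avoid_idx out) := by unfold Spec_pick_user_turn; infer_instance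

-- ===== CLAIM (what is proved, stated in full; the proofs are below) =====
def Claim_equal_pick_user_turn : Prop := ∀ (lines : List String) (min_words : Int) (avoid_idx : Option Int), Dom_pick_user_turn lines min_words avoid_idx → Spec_pick_user_turn lines min_words avoid_idx (pick_user_turn lines min_words avoid_idx)

-- ===== LEMMAS AND PROOFS =====

-- per-element emission of B's loop
def gB (lines : List String) (min_words : Int) (avoid_idx : Option Int) (p : Int × String) : List (Int × Int) :=
  if avoid_idx == some p.1 then []
  else match qualWordCount p.2 min_words with
    | none => []
    | some w => [(p.1, scoreB lines p.1 w)]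

def swapP (q : Int × Int) : Int × Int := (q.2, q.1)

-- "q is strictly better than r" under A's sort key (-score, index), expressed on B's (index, score) pairs
def btrB (q r : Int × Int) : Bool :=
  decide (-q.2 < -r.2) || (!decide (-r.2 < -q.2) && decide (q.1 < r.1))

lemma btrB_iff (q r : Int × Int) : btrB q r = true ↔ (r.2 < q.2 ∨ (q.2 = r.2 ∧ q.1 < r.1)) := by
  simp [btrB]; omega

lemma btrB_false_iff (q r : Int × Int) : btrB q r = false ↔ (q.2 ≤ r.2 ∧ (q.2 = r.2 → r.1 ≤ q.1)) := by
  simp [btrB]; omega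

-- B's loop body appends gB
lemma stepB_eq (lines : List String) (min_words : Int) (avoid_idx : Option Int)
    (acc : List (Int × Int)) (p : Int × String) :
    (if avoid_idx == some p.1 then acc
     else match qualWordCount p.2 min_words with
       | none => acc
       | some w => acc ++ [(p.1, scoreB lines p.1 w)]) = acc ++ gB lines min_words avoid_idx p := by
  unfold gB
  split_ifs with h
  · simp
  · cases qualWordCount p.2 min_words <;> simp

-- A's loop body appends the swapped gB element
lemma splitUserPrefix_pos (line : String) (h : PySem.Str.startswith line "User:" = true) :
    splitUserPrefix line = PySem.Str.strip (PySem.Str.slice line (some (PySem.Str.len "User:" : Int))) := by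
  unfold splitUserPrefix
  rw [if_pos h]

lemma banned_split (cl : String) :
    bannedB.any (fun k => PySem.Str.isIn k cl)
      = (["do not remember", "do not store", "forget", "delete", "do not retain"].any
          (fun k => PySem.Str.isIn k cl)
        || (PySem.Str.isIn "the detail is:" cl || PySem.Str.isIn "earlier detail i told you" cl ||
            PySem.Str.isIn "previous detail from memory" cl)) := by
  simp only [bannedB, List.any_cons, List.any_nil, Bool.or_false, Bool.or_assoc]

set_option maxHeartbeats 1000000 in
set_option maxRecDepth 8192 in
lemma stepA_eq (lines : List String) (min_words : Int) (avoid_idx : Option Int)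
    (acc : List (Int × Int)) (p : Int × String) :
    (if (match avoid_idx with | some a => decide (p.1 = a) | none => false) then acc
     else if !PySem.Str.startswith p.2 "User:" then acc
     else
       let c := splitUserPrefix p.2
       let cl := PySem.Str.lower c
       if ["do not remember", "do not store", "forget", "delete", "do not retain"].any
           (fun k => PySem.Str.isIn k cl) then acc
       else if PySem.Str.isIn "the detail is:" cl || PySem.Str.isIn "earlier detail i told you" cl ||
           PySem.Str.isIn "previous detail from memory" cl then acc
       else if ((PySem.Str.split₀ c).length : Int) < min_words then acc
       else
         let score : Int := 0
         let score := if decide (0 < p.1) &&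
             PySem.Str.startswith (PySem.List.pyGetD lines (p.1 - 1) "") "Side_Note" then score + 2 else score
         let score := if 16 ≤ (PySem.Str.split₀ c).length then score + 1 else score
         acc ++ [(score, p.1)])
    = acc ++ (gB lines min_words avoid_idx p).map swapP := by
  have havoid : (match avoid_idx with | some a => decide (p.1 = a) | none => false)
      = (avoid_idx == some p.1) := by
    cases avoid_idx with
    | none => rfl
    | some a =>
      show decide (p.1 = a) = ((some a : Option Int) == some p.1)
      rcases eq_or_ne p.1 a with h | h
      · subst h; simp
      · rw [decide_eq_false h]
        symm
        rw [beq_eq_false_iff_ne]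
        exact fun hc => h (by injection hc with h2; exact h2.symm)
  have hsw' := fun (h : PySem.Str.startswith p.2 "User:" = true) =>
    (show PySem.Chars.startswith p.2.toList ['U', 's', 'e', 'r', ':'] = true from by simpa using h)
  rw [havoid]
  by_cases hav : (avoid_idx == some p.1) = true
  · rw [if_pos hav]
    rw [show gB lines min_words avoid_idx p = [] from by unfold gB; rw [if_pos hav]]
    rw [List.map_nil, List.append_nil]
  · rw [if_neg hav]
    have hgB : gB lines min_words avoid_idx p
        = (match qualWordCount p.2 min_words with
           | none => []
           | some w => [(p.1, scoreB lines p.1 w)]) := by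
      unfold gB; rw [if_neg hav]
    rw [hgB]
    by_cases hsw : PySem.Str.startswith p.2 "User:" = true
    · rw [if_neg (show ¬(!PySem.Str.startswith p.2 "User:") = true from by simp [hsw' hsw]),
        splitUserPrefix_pos p.2 hsw]
      have hqual : qualWordCount p.2 min_words
          = (if bannedB.any (fun k => PySem.Str.isIn k (PySem.Str.lower (PySem.Str.strip
                (PySem.Str.slice p.2 (some (PySem.Str.len "User:" : Int)))))) then none
             else if min_words ≤ ((PySem.Str.split₀ (PySem.Str.strip
                (PySem.Str.slice p.2 (some (PySem.Str.len "User:" : Int))))).length : Int)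
             then some ((PySem.Str.split₀ (PySem.Str.strip
                (PySem.Str.slice p.2 (some (PySem.Str.len "User:" : Int))))).length : Int) else none) := by
        simp only [qualWordCount]
        rw [if_neg (show ¬(!PySem.Str.startswith p.2 "User:") = true from by simp [hsw' hsw])]
      rw [hqual]
      rw [banned_split]
      by_cases h5 : (["do not remember", "do not store", "forget", "delete", "do not retain"].any
          (fun k => PySem.Str.isIn k (PySem.Str.lower (PySem.Str.strip
            (PySem.Str.slice p.2 (some (PySem.Str.len "User:" : Int))))))) = true
      · rw [if_pos h5, if_pos (by rw [h5]; rfl)]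
        simp
      · rw [if_neg h5]
        by_cases h3 : (PySem.Str.isIn "the detail is:" (PySem.Str.lower (PySem.Str.strip
              (PySem.Str.slice p.2 (some (PySem.Str.len "User:" : Int)))))
            || PySem.Str.isIn "earlier detail i told you" (PySem.Str.lower (PySem.Str.strip
              (PySem.Str.slice p.2 (some (PySem.Str.len "User:" : Int)))))
            || PySem.Str.isIn "previous detail from memory" (PySem.Str.lower (PySem.Str.strip
              (PySem.Str.slice p.2 (some (PySem.Str.len "User:" : Int)))))) = true
        · rw [if_pos h3, if_pos (by rw [(Bool.eq_false_iff.mpr h5), h3]; rfl)]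
          simp
        · rw [if_neg h3, if_neg (show ¬(_ || _) = true from by
            rw [(Bool.eq_false_iff.mpr h5),
              (Bool.eq_false_iff.mpr h3)]
            decide)]
          by_cases hw : ((PySem.Str.split₀ (PySem.Str.strip (PySem.Str.slice p.2
              (some (PySem.Str.len "User:" : Int))))).length : Int) < min_words
          · rw [if_pos hw, if_neg (by omega)]
            simp
          · rw [if_neg hw, if_pos (by omega)]
            simp only [List.map_cons, List.map_nil, swapP, List.append_cancel_left_eq,
              List.cons.injEq, and_true, Prod.mk.injEq]
            unfold scoreB
            split_ifs <;> omega
    · have hsw2 : PySem.Chars.startswith p.2.toList ['U', 's', 'e', 'r', ':'] = false := by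
        rw [Bool.eq_false_iff]
        intro hcon
        exact hsw (by simpa using hcon)
      rw [if_pos (show (!PySem.Str.startswith p.2 "User:") = true from by simp [hsw2])]
      rw [show qualWordCount p.2 min_words = none from by
        unfold qualWordCount
        rw [if_pos (show (!PySem.Str.startswith p.2 "User:") = true from by simp [hsw2])]]
      simp

lemma loopA_eq (lines : List String) (min_words : Int) (avoid_idx : Option Int) :
    ((PySem.List.enumerate lines).foldl (fun cand p =>
      if ((match avoid_idx with | some a => decide (p.1 = a) | none => false) : Bool) then cand
      else if !PySem.Str.startswith p.2 "User:" then cand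
      else
        let c := splitUserPrefix p.2
        let cl := PySem.Str.lower c
        if ["do not remember", "do not store", "forget", "delete", "do not retain"].any
            (fun k => PySem.Str.isIn k cl) then cand
        else if PySem.Str.isIn "the detail is:" cl || PySem.Str.isIn "earlier detail i told you" cl ||
            PySem.Str.isIn "previous detail from memory" cl then cand
        else if ((PySem.Str.split₀ c).length : Int) < min_words then cand
        else
          let score : Int := 0
          let score := if decide (0 < p.1) &&
              PySem.Str.startswith (PySem.List.pyGetD lines (p.1 - 1) "") "Side_Note" then score + 2 else score
          let score := if 16 ≤ (PySem.Str.split₀ c).length then score + 1 else score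
          cand ++ [(score, p.1)]) [])
    = ((PySem.List.enumerate lines).flatMap (gB lines min_words avoid_idx)).map swapP := by
  have h := PySem.List.foldl_congr_mem
    (l := PySem.List.enumerate lines) (init := ([] : List (Int × Int)))
    (f := fun cand p =>
      if ((match avoid_idx with | some a => decide (p.1 = a) | none => false) : Bool) then cand
      else if !PySem.Str.startswith p.2 "User:" then cand
      else
        let c := splitUserPrefix p.2
        let cl := PySem.Str.lower c
        if ["do not remember", "do not store", "forget", "delete", "do not retain"].any
            (fun k => PySem.Str.isIn k cl) then cand
        else if PySem.Str.isIn "the detail is:" cl || PySem.Str.isIn "earlier detail i told you" cl ||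
            PySem.Str.isIn "previous detail from memory" cl then cand
        else if ((PySem.Str.split₀ c).length : Int) < min_words then cand
        else
          let score : Int := 0
          let score := if decide (0 < p.1) &&
              PySem.Str.startswith (PySem.List.pyGetD lines (p.1 - 1) "") "Side_Note" then score + 2 else score
          let score := if 16 ≤ (PySem.Str.split₀ c).length then score + 1 else score
          cand ++ [(score, p.1)])
    (g := fun acc p => acc ++ (gB lines min_words avoid_idx p).map swapP)
    (fun acc p _ => stepA_eq lines min_words avoid_idx acc p)
  rw [h, PySem.List.foldl_append_eq_flatMap, List.nil_append, List.map_flatMap]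

lemma loopB_eq (lines : List String) (min_words : Int) (avoid_idx : Option Int) :
    ((PySem.List.enumerate lines).foldl (fun acc p =>
      if avoid_idx == some p.1 then acc
      else match qualWordCount p.2 min_words with
        | none => acc
        | some w => acc ++ [(p.1, scoreB lines p.1 w)]) [])
    = (PySem.List.enumerate lines).flatMap (gB lines min_words avoid_idx) := by
  have h := PySem.List.foldl_congr_mem
    (l := PySem.List.enumerate lines) (init := ([] : List (Int × Int)))
    (f := fun acc p =>
      if avoid_idx == some p.1 then acc
      else match qualWordCount p.2 min_words with
        | none => acc
        | some w => acc ++ [(p.1, scoreB lines p.1 w)])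
    (g := fun acc p => acc ++ gB lines min_words avoid_idx p)
    (fun acc p _ => stepB_eq lines min_words avoid_idx acc p)
  rw [h, PySem.List.foldl_append_eq_flatMap, List.nil_append]

-- every element gB emits carries the enumeration index, a score between 0 and 3
lemma gB_mem (lines : List String) (min_words : Int) (avoid_idx : Option Int)
    (p : Int × String) (q : Int × Int) (hq : q ∈ gB lines min_words avoid_idx p) :
    q.1 = p.1 ∧ 0 ≤ q.2 ∧ q.2 ≤ 3 := by
  unfold gB at hq
  split_ifs at hq with h
  · simp at hq
  · cases hqual : qualWordCount p.2 min_words with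
    | none => rw [hqual] at hq; simp at hq
    | some w =>
      rw [hqual] at hq
      simp at hq
      subst hq
      refine ⟨rfl, ?_, ?_⟩ <;> (unfold scoreB; split_ifs <;> omega)

lemma pairwise_flatMap_gB (lines : List String) (min_words : Int) (avoid_idx : Option Int) :
    ∀ (l : List (Int × String)), l.Pairwise (fun a b => a.1 < b.1) →
      (l.flatMap (gB lines min_words avoid_idx)).Pairwise (fun a b => a.1 < b.1) := by
  intro l hl
  induction l with
  | nil => simp
  | cons x xs ih =>
    rw [List.flatMap_cons, List.pairwise_append]
    obtain ⟨hx, hxs⟩ := List.pairwise_cons.mp hl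
    refine ⟨?_, ih hxs, ?_⟩
    · -- gB emits at most one element
      unfold gB
      split_ifs
      · simp
      · cases qualWordCount x.2 min_words <;> simp
    · intro a ha b hb
      obtain ⟨y, hy, hby⟩ := List.mem_flatMap.mp hb
      have ha1 := (gB_mem _ _ _ _ _ ha).1
      have hb1 := (gB_mem _ _ _ _ _ hby).1
      rw [ha1, hb1]
      exact hx y hy

-- head of an insertion-sort fold is a running first-minimum
def minStep {α : Type} (before : α → α → Bool) (m : Option α) (x : α) : Option α :=
  some (match m with | none => x | some m' => if before x m' then x else m')

lemma head_insertBy {α : Type} (before : α → α → Bool) (x : α) (acc : List α) :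
    (PySem.List.insertBy before x acc).head? = minStep before acc.head? x := by
  cases acc with
  | nil => rfl
  | cons y ys =>
    rw [PySem.List.insertBy.eq_def]
    by_cases h : before x y = true
    · simp [h, minStep]
    · simp [h, minStep]

lemma head_foldl_insertBy {α : Type} (before : α → α → Bool) :
    ∀ (xs : List α) (acc : List α),
      (xs.foldl (fun a x => PySem.List.insertBy before x a) acc).head? =
      xs.foldl (minStep before) acc.head? := by
  intro xs
  induction xs with
  | nil => intro acc; rfl
  | cons x xs ih =>
    intro acc
    rw [List.foldl_cons, List.foldl_cons, ih, head_insertBy]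

-- transporting the running minimum through the (index,score) ↔ (score,index) swap
lemma stepS_swap (m : Option (Int × Int)) (q : Int × Int) :
    minStep (fun a b => (decide (-a.1 < -b.1) || (!decide (-b.1 < -a.1) && decide (a.2 < b.2))))
        (m.map swapP) (swapP q)
      = (minStep btrB m q).map swapP := by
  cases m with
  | none => rfl
  | some m' =>
    simp only [Option.map_some, minStep]
    rw [apply_ite swapP]
    rfl

lemma foldmin_map_swap :
    ∀ (ok : List (Int × Int)) (m : Option (Int × Int)),
      (ok.map swapP).foldl
          (minStep (fun a b => (decide (-a.1 < -b.1) || (!decide (-b.1 < -a.1) && decide (a.2 < b.2)))))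
          (m.map swapP)
      = (ok.foldl (minStep btrB) m).map swapP := by
  intro ok
  induction ok with
  | nil => intro m; rfl
  | cons q t ih =>
    intro m
    rw [List.map_cons, List.foldl_cons, List.foldl_cons, stepS_swap, ih]

-- the plain (non-Option) running minimum and its properties
lemma foldmin_some :
    ∀ (t : List (Int × Int)) (x : Int × Int),
      t.foldl (minStep btrB) (some x) = some (t.foldl (fun m q => if btrB q m then q else m) x) := by
  intro t
  induction t with
  | nil => intro x; rfl
  | cons q t ih =>
    intro x
    rw [List.foldl_cons, List.foldl_cons,
      show minStep btrB (some x) q = some (if btrB q x then q else x) from rfl, ih]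

lemma foldmin_spec :
    ∀ (t : List (Int × Int)) (x : Int × Int),
      ((t.foldl (fun m q => if btrB q m then q else m) x) ∈ x :: t)
      ∧ ((t.foldl (fun m q => if btrB q m then q else m) x) = x
          ∨ btrB (t.foldl (fun m q => if btrB q m then q else m) x) x = true)
      ∧ (∀ y ∈ x :: t, btrB y (t.foldl (fun m q => if btrB q m then q else m) x) = false) := by
  intro t
  induction t with
  | nil =>
    intro x
    refine ⟨List.mem_cons_self, Or.inl rfl, ?_⟩
    intro y hy
    rw [List.mem_singleton] at hy
    rw [List.foldl_nil, hy, btrB_false_iff]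
    omega
  | cons q t ih =>
    intro x
    rw [List.foldl_cons]
    by_cases h : btrB q x = true
    · rw [if_pos h]
      obtain ⟨hmem, hrel, hmin⟩ := ih q
      revert hmem hrel hmin
      generalize t.foldl (fun m q => if btrB q m then q else m) q = r
      intro hmem hrel hmin
      rw [btrB_iff] at h
      refine ⟨?_, ?_, ?_⟩
      · rcases List.mem_cons.mp hmem with h1 | h1 <;> simp [h1]
      · right
        rw [btrB_iff]
        rcases hrel with h1 | h1
        · subst h1; omega
        · rw [btrB_iff] at h1; omega
      · intro y hy
        rcases List.mem_cons.mp hy with h1 | h1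
        · subst h1
          rw [btrB_false_iff]
          rcases hrel with h2 | h2
          · subst h2; omega
          · rw [btrB_iff] at h2; omega
        · exact hmin y h1
    · rw [if_neg h]
      obtain ⟨hmem, hrel, hmin⟩ := ih x
      revert hmem hrel hmin
      generalize t.foldl (fun m q => if btrB q m then q else m) x = r
      intro hmem hrel hmin
      have hqx : btrB q x = false := Bool.eq_false_iff.mpr h
      rw [btrB_false_iff] at hqx
      refine ⟨?_, hrel, ?_⟩
      · rcases List.mem_cons.mp hmem with h1 | h1 <;> simp [h1]
      · intro y hy
        rcases List.mem_cons.mp hy with h1 | h1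
        · rw [h1]
          exact hmin x List.mem_cons_self
        · rcases List.mem_cons.mp h1 with h2 | h2
          · subst h2
            rw [btrB_false_iff]
            rcases hrel with h3 | h3
            · subst h3; omega
            · rw [btrB_iff] at h3; omega
          · exact hmin y (List.mem_cons_of_mem x h2)

-- the first match of a pairwise-ordered list relates to any other match
lemma find?_first {α : Type} {p : α → Bool} {R : α → α → Prop} :
    ∀ {l : List α} {a b : α}, l.Pairwise R → l.find? p = some a → b ∈ l → p b = true → (a = b ∨ R a b) := by
  intro l
  induction l with
  | nil => intro a b _ h; simp at h
  | cons x xs ih =>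
    intro a b hpw hfind hmem hb
    rcases List.pairwise_cons.mp hpw with ⟨hx, hxs⟩
    by_cases hpx : p x = true
    · rw [List.find?_cons_of_pos hpx] at hfind
      injection hfind with h
      subst h
      rcases List.mem_cons.mp hmem with h1 | h1
      · exact Or.inl h1.symm
      · exact Or.inr (hx b h1)
    · rw [List.find?_cons_of_neg (by simpa using hpx)] at hfind
      rcases List.mem_cons.mp hmem with h1 | h1
      · subst h1; rw [hb] at hpx; exact absurd rfl hpx
      · exact ih hxs hfind h1 hb

-- the bucket scan returns the index of the running minimum
lemma bucket_of_min (ok : List (Int × Int)) (m : Int × Int)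
    (hpw : ok.Pairwise (fun a b => a.1 < b.1))
    (hbd : ∀ q ∈ ok, 0 ≤ q.2 ∧ q.2 ≤ 3)
    (hmem : m ∈ ok) (hmin : ∀ y ∈ ok, btrB y m = false) :
    ([3, 2, 1, 0] : List Int).findSome? (fun t => (ok.find? (fun q => q.2 == t)).map (fun q => q.1))
      = some m.1 := by
  have hub : ∀ y ∈ ok, y.2 ≤ m.2 := by
    intro y hy
    have := hmin y hy
    rw [btrB_false_iff] at this
    exact this.1
  have hnone : ∀ t : Int, m.2 < t → ok.find? (fun q => q.2 == t) = none := by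
    intro t ht
    rw [List.find?_eq_none]
    intro q hq
    have := hub q hq
    simp
    omega
  have hsome : ok.find? (fun q => q.2 == m.2) = some m := by
    have hex : (ok.find? (fun q => q.2 == m.2)).isSome := by
      rw [List.find?_isSome]
      exact ⟨m, hmem, by simp⟩
    obtain ⟨a, ha⟩ := Option.isSome_iff_exists.mp hex
    have hpa := List.find?_some ha
    have hamem : a ∈ ok := List.mem_of_find?_eq_some ha
    have := find?_first hpw ha hmem (by simp)
    rcases this with h1 | h1
    · rw [ha, h1]
    · exfalso
      have hba : btrB a m = true := by
        rw [btrB_iff]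
        simp at hpa
        omega
      rw [hmin a hamem] at hba
      exact Bool.false_ne_true hba
  have hbm := hbd m hmem
  have h03 : m.2 = 3 ∨ m.2 = 2 ∨ m.2 = 1 ∨ m.2 = 0 := by omega
  rcases h03 with h | h | h | h <;>
    · rw [show ([3,2,1,0] : List Int).findSome? (fun t => (ok.find? (fun q => q.2 == t)).map (fun q => q.1))
          = _ from rfl]
      simp only [List.findSome?_cons]
      first
      | (rw [← h, hsome]; rfl)
      | (rw [hnone 3 (by omega)]
         simp only [Option.map_none]
         first
         | (rw [← h, hsome]; rfl)
         | (rw [hnone 2 (by omega)]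
            simp only [Option.map_none]
            first
            | (rw [← h, hsome]; rfl)
            | (rw [hnone 1 (by omega)]
               simp only [Option.map_none]
               rw [← h, hsome]; rfl)))

-- ===== VERDICT (by name: the statement is the Claim_ definition above) =====
theorem pick_user_turn_spec : Claim_equal_pick_user_turn := by
  intro lines min_words avoid_idx _dom
  unfold Spec_pick_user_turn pick_user_turn pick_user_turn_alt
  -- rewrite both loops as flatMaps of gB
  rw [loopA_eq, loopB_eq]
  set ok := (PySem.List.enumerate lines).flatMap (gB lines min_words avoid_idx) with hok
  -- A's sort-head is the running minimum over ok
  have hhead : (PySem.List.sorted2 (ok.map swapP) (fun x => -x.1) (fun x => x.2)).head?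
      = (ok.foldl (minStep btrB) none).map swapP := by
    rw [show PySem.List.sorted2 (ok.map swapP) (fun x => -x.1) (fun x => x.2)
        = (ok.map swapP).foldl (fun acc x => PySem.List.insertBy
            (fun a b => (decide (-a.1 < -b.1) || (!decide (-b.1 < -a.1) && decide (a.2 < b.2)))) x acc) []
        from rfl]
    rw [head_foldl_insertBy]
    exact foldmin_map_swap ok none
  cases hcase : ok with
  | nil =>
    rw [hcase] at hhead
    cases hs : PySem.List.sorted2 (([] : List (Int × Int)).map swapP) (fun x => -x.1) (fun x => x.2) with
    | nil => rfl
    | cons q rest => rw [hs] at hhead; simp at hhead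
  | cons x t =>
    rw [hcase] at hhead
    rw [List.foldl_cons, show minStep btrB none x = some x from rfl, foldmin_some] at hhead
    obtain ⟨hmem, _, hmin⟩ := foldmin_spec t x
    set r := t.foldl (fun m q => if btrB q m then q else m) x with hr
    have hpw : (x :: t).Pairwise (fun a b : Int × Int => a.1 < b.1) := by
      rw [← hcase, hok]
      exact pairwise_flatMap_gB lines min_words avoid_idx _ (PySem.List.pairwise_lt_enumerate lines 0)
    have hbd : ∀ q ∈ (x :: t), 0 ≤ q.2 ∧ q.2 ≤ 3 := by
      intro q hq
      rw [← hcase, hok] at hq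
      obtain ⟨p, _, hqp⟩ := List.mem_flatMap.mp hq
      exact ⟨(gB_mem _ _ _ _ _ hqp).2.1, (gB_mem _ _ _ _ _ hqp).2.2⟩
    rw [bucket_of_min (x :: t) r hpw hbd hmem hmin]
    cases hs : PySem.List.sorted2 ((x :: t).map swapP) (fun x => -x.1) (fun x => x.2) with
    | nil => rw [hs] at hhead; simp at hhead
    | cons q rest =>
      rw [hs] at hhead
      simp only [List.head?_cons, Option.map_some] at hhead
      injection hhead with hq
      rw [hq]
      simp [swapP]
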